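-- pv_equiv track=rewrite | github.com/suriyasureshok/GeneFlow | src/agents/protein_prediction.py | _detect_signal_peptide
-- ===== SOURCE A (Python) =====
-- def _detect_signal_peptide(aa_seq: str) -> bool:
--     """
--     Detects potential signal peptide using heuristic approach.
--
--     Checks for hydrophobic stretch in N-terminal region (first 30 AA).
--     A stretch of 5+ consecutive hydrophobic residues (A, L, I, V, F, M)
--     indicates potential signal peptide.
--
--     Args:
--         aa_seq: Amino acid sequence string
--
--     Returns:
--         True if signal peptide likely present, False otherwise
--     """
--     if len(aa_seq) < 20:
--         return False
--
--     n_term = aa_seq[:30]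
--     # Look for a stretch of 5+ hydrophobic residues (A, L, I, V, F, M)
--     hydrophobic_residues = set("ALIVFM")
--     streak = 0
--     for aa in n_term:
--         if aa in hydrophobic_residues:
--             streak += 1
--             if streak >= 5:
--                 return True
--         else:
--             streak = 0
--     return False
-- ===== SOURCE B (Python) =====
-- def _detect_signal_peptide(aa_seq: str) -> bool:
--     if len(aa_seq) < 20:
--         return False
--     n_term = aa_seq[:30]
--     # sliding window: any 5-residue window entirely hydrophobic
--     return any(all(c in "ALIVFM" for c in n_term[i:i + 5])
--                for i in range(len(n_term) - 4))
-- ===== Notes on version B (the rewrite author's own statement) =====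
-- stated objective: alternative
-- what changed: Replaced the stateful streak counter with early return by a stateless sliding-window scan: any 5-character window of the N-terminal slice that is entirely hydrophobic.
import Mathlib
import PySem

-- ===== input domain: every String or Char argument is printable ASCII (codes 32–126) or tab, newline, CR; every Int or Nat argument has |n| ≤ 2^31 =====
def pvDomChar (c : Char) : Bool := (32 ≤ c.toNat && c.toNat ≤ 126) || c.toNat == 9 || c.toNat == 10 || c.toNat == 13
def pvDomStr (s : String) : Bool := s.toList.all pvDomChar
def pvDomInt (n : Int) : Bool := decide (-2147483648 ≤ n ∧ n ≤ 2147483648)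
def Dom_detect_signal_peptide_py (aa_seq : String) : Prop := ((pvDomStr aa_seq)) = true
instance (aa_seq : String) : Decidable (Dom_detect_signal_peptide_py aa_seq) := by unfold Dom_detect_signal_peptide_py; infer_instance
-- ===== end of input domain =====

-- B replaces A's stateful streak counter (with early return) by a stateless
-- sliding-window any/all scan over the same N-terminal slice; alternative, same cost.


-- ===== PORT A =====
-- aa in set("ALIVFM")
def hydroA (c : Char) : Bool := "ALIVFM".toList.contains c

-- the for-loop over n_term with the streak counter and early return True
def loopA : List Char → Int → Bool
  | [], _ => false
  | c :: cs, streak =>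
    if hydroA c then
      if streak + 1 ≥ 5 then true else loopA cs (streak + 1)
    else loopA cs 0

def detect_signal_peptide_py (aa_seq : String) : Bool :=
  if aa_seq.toList.length < 20 then false
  else loopA (PySem.List.slice aa_seq.toList none (some 30)) 0

-- ===== PORT B =====
-- c in "ALIVFM"
def hydroB (c : Char) : Bool := "ALIVFM".toList.contains c

-- all(c in "ALIVFM" for c in n_term[i:i+5]); suffixes shorter than 5 (the i ≥ len-4
-- that range(len(n_term)-4) excludes) are vacuously false here, so any() is unchanged
def winB : List Char → Bool
  | c1 :: c2 :: c3 :: c4 :: c5 :: _ =>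
    hydroB c1 && hydroB c2 && hydroB c3 && hydroB c4 && hydroB c5
  | _ => false

-- any(... for i in range(...)): disjunction of the window test over all suffixes
def loopB : List Char → Bool
  | [] => false
  | c :: cs => winB (c :: cs) || loopB cs

def detect_signal_peptide_py_alt (aa_seq : String) : Bool :=
  if aa_seq.toList.length < 20 then false
  else loopB (PySem.List.slice aa_seq.toList none (some 30))

-- ===== PRECONDITION & SPEC =====
def Spec_detect_signal_peptide_py (aa_seq : String) (out : Bool) : Prop := out = detect_signal_peptide_py_alt aa_seq
instance (aa_seq : String) (out : Bool) : Decidable (Spec_detect_signal_peptide_py aa_seq out) := by unfold Spec_detect_signal_peptide_py; infer_instance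

-- ===== CLAIM (what is proved, stated in full; the proofs are below) =====
def Claim_equal_detect_signal_peptide_py : Prop := ∀ (aa_seq : String), Dom_detect_signal_peptide_py aa_seq → Spec_detect_signal_peptide_py aa_seq (detect_signal_peptide_py aa_seq)

-- ===== LEMMAS AND PROOFS =====

-- "the first m characters exist and are all hydrophobic"
def hp : Nat → List Char → Bool
  | 0, _ => true
  | _ + 1, [] => false
  | m + 1, c :: cs => hydroB c && hp m cs

theorem winB_eq_hp5 (l : List Char) : winB l = hp 5 l := by
  rcases l with _ | ⟨a, _ | ⟨b, _ | ⟨c, _ | ⟨d, _ | ⟨e, t⟩⟩⟩⟩⟩ <;>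
    simp [winB, hp, Bool.and_assoc]

theorem hp_mono : ∀ (l : List Char) (m n : Nat), m ≤ n → hp n l = true → hp m l = true := by
  intro l
  induction l with
  | nil =>
    intro m n hmn h
    cases n with
    | zero =>
      cases m with
      | zero => exact h
      | succ m' => omega
    | succ n' => simp [hp] at h
  | cons c cs ih =>
    intro m n hmn h
    cases m with
    | zero => simp [hp]
    | succ m' =>
      cases n with
      | zero => omega
      | succ n' =>
        simp [hp] at h ⊢
        exact ⟨h.1, ih m' n' (by omega) h.2⟩

theorem absorb (cs : List Char) : (hp 5 cs || loopB cs) = loopB cs := by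
  cases cs with
  | nil => simp [hp, loopB]
  | cons c t =>
    simp only [loopB, winB_eq_hp5, ← Bool.or_assoc, Bool.or_self]

theorem loopA_eq (cs : List Char) : ∀ (s : Int), 0 ≤ s → s ≤ 4 →
    loopA cs s = (hp (5 - s.toNat) cs || loopB cs) := by
  induction cs with
  | nil =>
    intro s h0 h4
    interval_cases s <;> simp [loopA, hp, loopB]
  | cons c t ih =>
    intro s h0 h4
    by_cases hc : hydroA c
    · have hcb : hydroB c = true := hc
      have hstep : ∀ m : Nat, m ≤ 4 → (hp m t || loopB t) = (hp m t || loopB (c :: t)) := by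
        intro m hm
        have hB : loopB (c :: t) = (hp 4 t || loopB t) := by
          cases t with
          | nil => simp [loopB, winB_eq_hp5, hp, hcb]
          | cons d u => simp [loopB, winB_eq_hp5, hp, hcb]
        rw [hB]
        cases h4t : hp 4 t with
        | false => simp
        | true =>
          have := hp_mono t m 4 hm h4t
          simp [this]
      interval_cases s
      · rw [show loopA (c :: t) 0 = loopA t 1 from by norm_num [loopA, hc],
            ih 1 (by omega) (by omega)]
        show (hp 4 t || loopB t) = (hp 5 (c :: t) || loopB (c :: t))
        rw [show hp 5 (c :: t) = (hydroB c && hp 4 t) from rfl, hcb, Bool.true_and]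
        exact hstep 4 (by omega)
      · rw [show loopA (c :: t) 1 = loopA t 2 from by norm_num [loopA, hc],
            ih 2 (by omega) (by omega)]
        show (hp 3 t || loopB t) = (hp 4 (c :: t) || loopB (c :: t))
        rw [show hp 4 (c :: t) = (hydroB c && hp 3 t) from rfl, hcb, Bool.true_and]
        exact hstep 3 (by omega)
      · rw [show loopA (c :: t) 2 = loopA t 3 from by norm_num [loopA, hc],
            ih 3 (by omega) (by omega)]
        show (hp 2 t || loopB t) = (hp 3 (c :: t) || loopB (c :: t))
        rw [show hp 3 (c :: t) = (hydroB c && hp 2 t) from rfl, hcb, Bool.true_and]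
        exact hstep 2 (by omega)
      · rw [show loopA (c :: t) 3 = loopA t 4 from by norm_num [loopA, hc],
            ih 4 (by omega) (by omega)]
        show (hp 1 t || loopB t) = (hp 2 (c :: t) || loopB (c :: t))
        rw [show hp 2 (c :: t) = (hydroB c && hp 1 t) from rfl, hcb, Bool.true_and]
        exact hstep 1 (by omega)
      · simp [loopA, hc, hp, hcb]
    · have hcb : hydroB c = false := by
        simp [hydroB]; simpa [hydroA] using hc
      have h5s : ∃ k, 5 - s.toNat = k + 1 := ⟨4 - s.toNat, by omega⟩
      obtain ⟨k, hk⟩ := h5s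
      rw [show loopA (c :: t) s = loopA t 0 by simp [loopA, hc],
          ih 0 (by omega) (by omega), hk]
      simp only [loopB, winB_eq_hp5, hp, hcb, Bool.false_and, Bool.false_or]
      exact absorb t

-- ===== VERDICT (by name: the statement is the Claim_ definition above) =====
theorem detect_signal_peptide_py_spec : Claim_equal_detect_signal_peptide_py := by
  intro aa_seq _
  unfold Spec_detect_signal_peptide_py detect_signal_peptide_py detect_signal_peptide_py_alt
  split
  · rfl
  · rw [loopA_eq _ 0 (by omega) (by omega)]
    exact absorb _
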